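-- pv_equiv track=rewrite | github.com/battower/WaveCollapse_ | SquareGrid.py | intersections
-- ===== SOURCE A (Python) =====
-- def intersections(N):
--     for ay in range(-1 * N + 1, N):
--         for ax in range(-1 * N + 1, N):
--             if ax == 0 and ay == 0:
--                 continue
--             else:
--                 xys = tuple((xy for xy in intersect_squares((0, 0), (ax, ay), N)))
--                 yield (ax, ay), xys
--
-- def intersect_squares(a, b, N):
--
--     ax, ay = a
--     bx, by = b
--     width, height = N, N
--     xmin = min(ax, bx)
--     ymin = min(ay, by)
--
--     for j in range(ymin, ymin + height + 1):
--         for k in range(xmin, xmin + width + 1):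
--             if ax <= k < ax + width and bx <= k < bx + width:
--                 if ay <= j < ay + height and by <= j < by + height:
--                     yield k, j
-- ===== SOURCE B (Python) =====
-- def intersections(N):
--     # Compute each overlap rectangle analytically (tight bounds) instead of
--     # scanning every candidate cell and testing four inequalities per cell.
--     for ay in range(1 - N, N):
--         jlo, jhi = max(0, ay), min(N, ay + N)
--         for ax in range(1 - N, N):
--             if (ax, ay) != (0, 0):
--                 klo, khi = max(0, ax), min(N, ax + N)
--                 yield (ax, ay), tuple([(k, j) for j in range(jlo, jhi) for k in range(klo, khi)])
-- ===== Notes on version B (the rewrite author's own statement) =====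
-- stated objective: faster
-- what changed: B computes each pair's overlap rectangle analytically as range(max(0,ax),min(N,ax+N)) x range(max(0,ay),min(N,ay+N)) and enumerates only those cells, instead of A's helper that scans all (N+1)^2 candidate cells per pair and tests four inequalities per cell.
import Mathlib
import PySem

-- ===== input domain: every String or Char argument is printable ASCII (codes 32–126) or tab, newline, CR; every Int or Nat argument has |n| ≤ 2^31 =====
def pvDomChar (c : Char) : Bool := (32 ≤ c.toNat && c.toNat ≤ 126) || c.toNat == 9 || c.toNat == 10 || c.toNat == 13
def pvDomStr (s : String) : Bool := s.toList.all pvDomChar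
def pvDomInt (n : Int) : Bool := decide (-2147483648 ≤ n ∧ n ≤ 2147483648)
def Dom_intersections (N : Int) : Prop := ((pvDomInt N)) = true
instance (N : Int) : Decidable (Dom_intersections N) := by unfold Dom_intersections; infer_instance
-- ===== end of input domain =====

-- B computes each overlap rectangle analytically (tight bounds) instead of A's
-- per-pair scan of all candidate cells with four inequality tests per cell;
-- a timing run measures the speed.
-- Both Pythons are generators; the equivalence is about the produced sequence.

-- ===== PORT A =====
-- literal port of intersect_squares (nested generator loops → flatMap)
def intersectSquares (a b : Int × Int) (N : Int) : List (Int × Int) :=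
  let ax := a.1; let ay := a.2
  let bx := b.1; let by_ := b.2
  let width := N; let height := N
  let xmin := min ax bx
  let ymin := min ay by_
  (PySem.List.pyRange ymin (ymin + height + 1) 1).flatMap (fun j =>
    (PySem.List.pyRange xmin (xmin + width + 1) 1).flatMap (fun k =>
      if ax ≤ k ∧ k < ax + width ∧ bx ≤ k ∧ k < bx + width then
        if ay ≤ j ∧ j < ay + height ∧ by_ ≤ j ∧ j < by_ + height then [(k, j)] else []
      else []))

def intersections (N : Int) : List ((Int × Int) × (List (Int × Int))) :=
  (PySem.List.pyRange (-1 * N + 1) N 1).flatMap (fun ay =>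
    (PySem.List.pyRange (-1 * N + 1) N 1).flatMap (fun ax =>
      if ax = 0 ∧ ay = 0 then []
      else [((ax, ay), intersectSquares (0, 0) (ax, ay) N)]))

-- ===== PORT B =====
def intersections_alt (N : Int) : List ((Int × Int) × (List (Int × Int))) :=
  (PySem.List.pyRange (1 - N) N 1).flatMap (fun ay =>
    let jlo := max 0 ay; let jhi := min N (ay + N)
    (PySem.List.pyRange (1 - N) N 1).flatMap (fun ax =>
      if (ax, ay) ≠ ((0 : Int), (0 : Int)) then
        let klo := max 0 ax; let khi := min N (ax + N)
        [((ax, ay), (PySem.List.pyRange jlo jhi 1).flatMap (fun j =>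
            (PySem.List.pyRange klo khi 1).map (fun k => (k, j))))]
      else []))

-- ===== PRECONDITION & SPEC =====
def Spec_intersections (N : Int) (out : List ((Int × Int) × (List (Int × Int)))) : Prop := out = intersections_alt N
instance (N : Int) (out : List ((Int × Int) × (List (Int × Int)))) : Decidable (Spec_intersections N out) := by unfold Spec_intersections; infer_instance

-- ===== CLAIM (what is proved, stated in full; the proofs are below) =====
def Claim_equal_intersections : Prop := ∀ (N : Int), Dom_intersections N → Spec_intersections N (intersections N)

-- ===== LEMMAS AND PROOFS =====

theorem flatMap_congr_mem {α β : Type} {l : List α} {f g : α → List β}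
    (h : ∀ x ∈ l, f x = g x) : l.flatMap f = l.flatMap g := by
  induction l with
  | nil => rfl
  | cons y t ih =>
      simp only [List.flatMap_cons]
      rw [h y (List.mem_cons_self), ih (fun x hx => h x (List.mem_cons_of_mem y hx))]

theorem flatMap_sing {α β : Type} (l : List α) (f : α → β) :
    l.flatMap (fun x => [f x]) = l.map f := by
  induction l with
  | nil => rfl
  | cons y t ih => simp [ih]

-- filtering a range by membership in a contained window yields the subrange
theorem flatMap_window {α : Type} (lo a : Int) (g : Int → List α) (ha : lo ≤ a) :
    ∀ (n : ℕ) (b : Int), b ≤ lo + n →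
      (PySem.List.pyRange lo (lo + n) 1).flatMap
          (fun x => if a ≤ x ∧ x < b then g x else []) =
        (PySem.List.pyRange a b 1).flatMap g := by
  intro n
  induction n with
  | zero =>
      intro b hb
      rw [show lo + ((0 : ℕ) : Int) = lo by omega]
      rw [PySem.List.pyRange_one_eq_nil (le_refl lo),
          PySem.List.pyRange_one_eq_nil (by omega : b ≤ a)]
      rfl
  | succ n ih =>
      intro b hb
      rw [show lo + ((n + 1 : ℕ) : Int) = (lo + n) + 1 by push_cast; ring]
      rw [PySem.List.pyRange_one_succ_right (by omega : lo ≤ lo + n), List.flatMap_append]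
      by_cases hbn : b ≤ lo + (n : Int)
      · rw [ih b hbn]
        simp only [List.flatMap_cons, List.flatMap_nil, List.append_nil]
        rw [if_neg (by omega)]
        simp
      · have hb' : b = lo + n + 1 := by omega
        by_cases han : a ≤ lo + (n : Int)
        · rw [flatMap_congr_mem (g := fun x => if a ≤ x ∧ x < lo + (n : Int) then g x else [])
            (by
              intro x hx
              dsimp only
              rw [PySem.List.mem_pyRange_one] at hx
              by_cases hax : a ≤ x
              · rw [if_pos ⟨hax, by omega⟩, if_pos ⟨hax, by omega⟩]
              · rw [if_neg (by omega), if_neg (by omega)])]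
          rw [ih (lo + n) (le_refl _)]
          rw [hb', PySem.List.pyRange_one_succ_right han, List.flatMap_append]
          simp only [List.flatMap_cons, List.flatMap_nil, List.append_nil]
          rw [if_pos ⟨han, by omega⟩]
        · rw [flatMap_congr_mem (g := fun _ => ([] : List α))
            (by
              intro x hx
              dsimp only
              rw [PySem.List.mem_pyRange_one] at hx
              rw [if_neg (by omega)])]
          simp only [List.flatMap_cons, List.flatMap_nil, List.append_nil]
          rw [if_neg (by omega), PySem.List.pyRange_one_eq_nil (by omega : b ≤ a)]
          simp

-- A's scanning helper equals the analytic overlap rectangle (for N ≥ 0, any offsets)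
theorem intersectSquares_eq (N ax ay : Int) (hN : 0 ≤ N) :
    intersectSquares (0, 0) (ax, ay) N =
      (PySem.List.pyRange (max 0 ay) (min N (ay + N)) 1).flatMap (fun j =>
        (PySem.List.pyRange (max 0 ax) (min N (ax + N)) 1).map (fun k => (k, j))) := by
  unfold intersectSquares
  simp only
  have hrow : ∀ j : Int,
      (PySem.List.pyRange (min 0 ax) (min 0 ax + N + 1) 1).flatMap (fun k =>
        if 0 ≤ k ∧ k < 0 + N ∧ ax ≤ k ∧ k < ax + N then
          if 0 ≤ j ∧ j < 0 + N ∧ ay ≤ j ∧ j < ay + N then [(k, j)] else []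
        else []) =
      if max 0 ay ≤ j ∧ j < min N (ay + N) then
        (PySem.List.pyRange (max 0 ax) (min N (ax + N)) 1).map (fun k => (k, j))
      else [] := by
    intro j
    by_cases hj : 0 ≤ j ∧ j < 0 + N ∧ ay ≤ j ∧ j < ay + N
    · rw [if_pos (by omega : max 0 ay ≤ j ∧ j < min N (ay + N))]
      rw [flatMap_congr_mem (g := fun k =>
            if max 0 ax ≤ k ∧ k < min N (ax + N) then [(k, j)] else [])
          (by
            intro k _
            dsimp only
            rw [if_pos hj]
            by_cases hk : 0 ≤ k ∧ k < 0 + N ∧ ax ≤ k ∧ k < ax + N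
            · rw [if_pos hk, if_pos (by omega)]
            · rw [if_neg hk, if_neg (by omega)])]
      rw [show min 0 ax + N + 1 = min 0 ax + (((N + 1).toNat : ℕ) : Int) by omega]
      rw [flatMap_window (min 0 ax) (max 0 ax) _ (by omega) (N + 1).toNat
            (min N (ax + N)) (by omega)]
      exact flatMap_sing _ _
    · rw [if_neg (by omega : ¬(max 0 ay ≤ j ∧ j < min N (ay + N)))]
      rw [flatMap_congr_mem (g := fun _ => ([] : List (Int × Int)))
          (by intro k _; dsimp only; rw [if_neg hj]; split <;> rfl)]
      simp
  rw [flatMap_congr_mem (g := fun j =>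
        if max 0 ay ≤ j ∧ j < min N (ay + N) then
          (PySem.List.pyRange (max 0 ax) (min N (ax + N)) 1).map (fun k => (k, j))
        else [])
      (fun j _ => hrow j)]
  rw [show min 0 ay + N + 1 = min 0 ay + (((N + 1).toNat : ℕ) : Int) by omega]
  exact flatMap_window (min 0 ay) (max 0 ay) _ (by omega) (N + 1).toNat
    (min N (ay + N)) (by omega)

-- ===== VERDICT (by name: the statement is the Claim_ definition above) =====
theorem intersections_spec : Claim_equal_intersections := by
  intro N _
  unfold Spec_intersections intersections intersections_alt
  by_cases hN : 1 ≤ N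
  · rw [show -1 * N + 1 = 1 - N by ring]
    refine flatMap_congr_mem (fun ay _ => ?_)
    refine flatMap_congr_mem (fun ax _ => ?_)
    dsimp only
    by_cases h : ax = 0 ∧ ay = 0
    · rw [if_pos h, if_neg (by simp [h.1, h.2])]
    · rw [if_neg h, if_pos (by simp only [ne_eq, Prod.mk.injEq]; exact fun hc => h ⟨hc.1, hc.2⟩)]
      rw [intersectSquares_eq N ax ay (by omega)]
  · rw [PySem.List.pyRange_one_eq_nil (by omega : N ≤ -1 * N + 1),
        PySem.List.pyRange_one_eq_nil (by omega : N ≤ 1 - N)]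
    rfl
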